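-- pv_equiv track=rewrite | github.com/mattbeck1/amides | normalization_exp.py | flag_variations
-- ===== SOURCE A (Python) =====
-- def flag_variations(prev_variants):
--     tokens = prev_variants[0]
--     variants = prev_variants
--     for i, t in enumerate(tokens):
--         temp_variants = variants.copy()
--         if t[0] == '/':
--             for v in variants:
--                 temp = v.copy()
--                 temp[i] = t.replace('/', '-')
--                 temp_variants.append(temp)
--             variants = temp_variants
--         if t[0] == '-':
--             for v in variants:
--                 temp = v.copy()
--                 temp[i] = t.replace('-', '/')
--                 temp_variants.append(temp)
--             variants = temp_variants
--     return variants
-- ===== SOURCE B (Python) =====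
-- def flag_variations(prev_variants):
--     tokens = prev_variants[0]
--     flags = []
--     for i, t in enumerate(tokens):
--         if t[0] == '/':
--             flags.append((i, t.replace('/', '-')))
--         elif t[0] == '-':
--             flags.append((i, t.replace('-', '/')))
--     out = []
--     for mask in range(2 ** len(flags)):
--         for v in prev_variants:
--             w = list(v)
--             m = mask
--             for i, alt in flags:
--                 if m & 1:
--                     w[i] = alt
--                 m >>= 1
--             out.append(w)
--     return out
-- ===== Notes on version B (the rewrite author's own statement) =====
-- stated objective: alternative
-- what changed: Instead of repeatedly doubling the variants list in place per flagged token, B first scans the first variant once to collect (index, alternate-token) flags and then directly enumerates all 2^k bitmask combinations (first flag = least-significant bit, original variants as the inner loop), which reproduces A's exact values and order.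
-- outside the precondition, e.g. on flag_variations([]): A raises IndexError, B raises IndexError; on flag_variations([['', 'a']]): A raises IndexError, B raises IndexError; on flag_variations([['/a'], []]): A raises IndexError, B raises IndexError
import Mathlib
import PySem

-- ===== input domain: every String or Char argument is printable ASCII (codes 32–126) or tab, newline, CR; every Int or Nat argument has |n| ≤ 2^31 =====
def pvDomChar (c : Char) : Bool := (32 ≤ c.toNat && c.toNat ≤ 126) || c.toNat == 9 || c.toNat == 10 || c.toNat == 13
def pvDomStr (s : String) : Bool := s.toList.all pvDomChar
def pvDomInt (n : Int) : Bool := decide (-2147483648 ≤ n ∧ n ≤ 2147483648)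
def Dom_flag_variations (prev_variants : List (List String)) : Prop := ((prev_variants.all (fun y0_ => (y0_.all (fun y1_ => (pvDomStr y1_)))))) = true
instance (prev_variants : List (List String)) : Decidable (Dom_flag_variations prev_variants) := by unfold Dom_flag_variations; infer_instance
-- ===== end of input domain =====

-- B replaces A's in-place doubling of the variants list by a one-pass flag scan
-- followed by direct enumeration of all 2^k bitmasks; alternative decomposition, same values and order.


-- shared primitive: Python 'v[i] = x'; exact for 0 ≤ i < len v (the only indices reached inside Pre_;
-- Python raises on out-of-range i, which Pre_ excludes)
def pvSetItem (v : List String) (i : Int) (x : String) : List String := v.set i.toNat x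

-- ===== PORT A =====
-- one iteration of A's 'for i, t in enumerate(tokens)' body (state = variants)
def pvStepA (variants : List (List String)) (it : Int × String) : List (List String) :=
  let temp_variants := variants
  let p : List (List String) × List (List String) :=
    if PySem.Str.pyGet? it.2 0 == some '/' then
      let tv := temp_variants ++ variants.map (fun v => pvSetItem v it.1 (PySem.Str.replace it.2 "/" "-"))
      (tv, tv)
    else (variants, temp_variants)
  if PySem.Str.pyGet? it.2 0 == some '-' then
    p.2 ++ p.1.map (fun v => pvSetItem v it.1 (PySem.Str.replace it.2 "-" "/"))
  else p.1

def flag_variations (prev_variants : List (List String)) : List (List String) :=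
  let tokens := (PySem.List.pyGet? prev_variants 0).getD []
  (PySem.List.enumerate tokens).foldl pvStepA prev_variants

-- ===== PORT B =====
-- the (index, alternate token) flag produced by one token of the first variant, if any
def pvFlagOf (it : Int × String) : Option (Int × String) :=
  match PySem.Str.pyGet? it.2 0 with
  | some '/' => some (it.1, PySem.Str.replace it.2 "/" "-")
  | some '-' => some (it.1, PySem.Str.replace it.2 "-" "/")
  | _ => none

-- Source B's inner 'for i, alt in flags' loop: apply the flags selected by the mask's bits
def pvApplyMask : List (Int × String) → Nat → List String → List String
  | [], _, v => v
  | f :: fs, m, v => pvApplyMask fs (m >>> 1) (if m &&& 1 == 1 then pvSetItem v f.1 f.2 else v)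

def flag_variations_alt (prev_variants : List (List String)) : List (List String) :=
  let tokens := (PySem.List.pyGet? prev_variants 0).getD []
  let flags := (PySem.List.enumerate tokens).filterMap pvFlagOf
  (List.range (2 ^ flags.length)).flatMap (fun mask => prev_variants.map (fun v => pvApplyMask flags mask v))

-- ===== PRECONDITION & SPEC =====
-- Pre_ excludes exactly the inputs where Python A raises IndexError: empty prev_variants,
-- an empty token in the first variant, or a slash/dash-flagged position missing from some variant.
def Pre_flag_variations (prev_variants : List (List String)) : Prop :=
  prev_variants ≠ [] ∧
  (∀ t ∈ prev_variants.headD [], t ≠ "") ∧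
  (∀ i : Nat, i < (prev_variants.headD []).length →
    (PySem.Str.startswith ((prev_variants.headD []).getD i "") "/" = true ∨
     PySem.Str.startswith ((prev_variants.headD []).getD i "") "-" = true) →
    ∀ v ∈ prev_variants, i < v.length)
instance (prev_variants : List (List String)) : Decidable (Pre_flag_variations prev_variants) := by
  unfold Pre_flag_variations; infer_instance

def pvWitness_flag_variations : List (List String) := [["/usr", "x", "-f"], ["/usr", "y", "-g"]]

def Spec_flag_variations (prev_variants : List (List String)) (out : List (List String)) : Prop := out = flag_variations_alt prev_variants
instance (prev_variants : List (List String)) (out : List (List String)) : Decidable (Spec_flag_variations prev_variants out) := by unfold Spec_flag_variations; infer_instance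

-- ===== CLAIM (what is proved, stated in full; the proofs are below) =====
def Claim_equal_flag_variations : Prop := ∀ (prev_variants : List (List String)), Dom_flag_variations prev_variants → Pre_flag_variations prev_variants → Spec_flag_variations prev_variants (flag_variations prev_variants)

-- ===== LEMMAS AND PROOFS =====

-- A's loop body, characterised by the flag of the current token
theorem pvStepA_eq (V : List (List String)) (it : Int × String) :
    pvStepA V it =
      match pvFlagOf it with
      | none => V
      | some f => V ++ V.map (fun v => pvSetItem v f.1 f.2) := by
  unfold pvStepA pvFlagOf
  rcases h : PySem.Str.pyGet? it.2 0 with _ | c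
  · simp
  · by_cases h1 : c = '/'
    · subst h1; simp
    · by_cases h2 : c = '-'
      · subst h2; simp
      · simp [h1, h2]

theorem pvApplyMask_append (fs : List (Int × String)) (f : Int × String) (m : Nat) (v : List String) :
    pvApplyMask (fs ++ [f]) m v =
      (if (m >>> fs.length) &&& 1 == 1 then pvSetItem (pvApplyMask fs m v) f.1 f.2
       else pvApplyMask fs m v) := by
  induction fs generalizing m v with
  | nil => simp [pvApplyMask]
  | cons g fs ih =>
      simp only [List.cons_append, pvApplyMask, ih]
      have : (m >>> 1) >>> fs.length = m >>> (fs.length + 1) := by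
        rw [← Nat.shiftRight_add, Nat.add_comm]
      rw [this]
      simp

theorem pvApplyMask_high (fs : List (Int × String)) (m : Nat) (v : List String) :
    pvApplyMask fs (2 ^ fs.length + m) v = pvApplyMask fs m v := by
  induction fs generalizing m v with
  | nil => simp [pvApplyMask]
  | cons f fs ih =>
      simp only [pvApplyMask, List.length_cons]
      have hand : (2 ^ (fs.length + 1) + m) &&& 1 = m &&& 1 := by
        rw [Nat.and_one_is_mod, Nat.and_one_is_mod, pow_succ]
        omega
      have hshift : (2 ^ (fs.length + 1) + m) >>> 1 = 2 ^ fs.length + m >>> 1 := by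
        rw [Nat.shiftRight_one, Nat.shiftRight_one, pow_succ]
        omega
      simp only [hand, hshift, ih]

-- B's expansion, as a function of the flag list
def pvExpand (fs : List (Int × String)) (V : List (List String)) : List (List String) :=
  (List.range (2 ^ fs.length)).flatMap (fun mask => V.map (fun v => pvApplyMask fs mask v))

theorem pvExpand_nil (V : List (List String)) : pvExpand [] V = V := by
  simp [pvExpand, pvApplyMask]

theorem pvExpand_snoc (fs : List (Int × String)) (f : Int × String) (V : List (List String)) :
    pvExpand (fs ++ [f]) V =
      pvExpand fs V ++ (pvExpand fs V).map (fun v => pvSetItem v f.1 f.2) := by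
  unfold pvExpand
  have hlen : (fs ++ [f]).length = fs.length + 1 := by simp
  have hrange : List.range (2 ^ (fs ++ [f]).length)
      = List.range (2 ^ fs.length) ++ (List.range (2 ^ fs.length)).map (fun x => 2 ^ fs.length + x) := by
    rw [hlen, pow_succ, Nat.mul_two, List.range_add]
  rw [hrange, List.flatMap_append, List.flatMap_map]
  congr 1
  · apply List.flatMap_congr  -- low half: bit fs.length is 0
    intro m hm
    have hlt : m < 2 ^ fs.length := List.mem_range.mp hm
    apply List.map_congr_left
    intro v _
    rw [pvApplyMask_append]
    have : m >>> fs.length = 0 := by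
      rw [Nat.shiftRight_eq_div_pow]; exact Nat.div_eq_of_lt hlt
    simp [this]
  · rw [List.map_flatMap]
    apply List.flatMap_congr
    intro m hm
    have hlt : m < 2 ^ fs.length := List.mem_range.mp hm
    rw [List.map_map]
    apply List.map_congr_left
    intro v _
    rw [pvApplyMask_append]
    have h1 : (2 ^ fs.length + m) >>> fs.length = 1 := by
      rw [Nat.shiftRight_eq_div_pow,
        Nat.add_div_left _ (Nat.two_pow_pos _), Nat.div_eq_of_lt hlt]
    simp only [h1]
    simp [pvApplyMask_high, Function.comp]

-- A's whole loop equals B's bitmask expansion of the collected flags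
theorem foldl_stepA_eq_expand (L : List (Int × String)) (V : List (List String)) :
    L.foldl pvStepA V = pvExpand (L.filterMap pvFlagOf) V := by
  induction L using List.reverseRecOn with
  | nil => simp [pvExpand_nil]
  | append_singleton L x ih =>
      rw [List.foldl_append, List.foldl_cons, List.foldl_nil, List.filterMap_append, ih, pvStepA_eq]
      rcases h : pvFlagOf x with _ | f
      · simp [h]
      · simp [h, pvExpand_snoc]

-- ===== VERDICT (by name: the statement is the Claim_ definition above) =====
theorem flag_variations_spec : Claim_equal_flag_variations := by
  intro prev_variants _ _
  unfold Spec_flag_variations flag_variations flag_variations_alt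
  rw [foldl_stepA_eq_expand]
  rfl
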